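-- pv_equiv track=rewrite | github.com/LimJih00n/CODE_TEST | 250317/강력한 폭발/strong-explosion.py | gen_h
-- ===== SOURCE A (Python) =====
-- def gen_h(ele,r):
--     re =[]
--     def dfs(path):
--         if len(path) == r:
--             re.append(path[:])
--             return
--         for i in range(len(ele)):
--             path.append(ele[i])
--             dfs(path)
--             path.pop()
--     dfs([])
--     return re
-- ===== SOURCE B (Python) =====
-- def gen_h(ele, r):
--     result = [[]]
--     for _ in range(r):
--         result = [p + [x] for p in result for x in ele]
--     return result
-- ===== Notes on version B (the rewrite author's own statement) =====
-- stated objective: simpler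
-- what changed: Replaces the recursive backtracking DFS with a mutable path by an iterative frontier: start from [[]] and r times extend every partial sequence by every element.
-- outside the precondition, e.g. on gen_h([], -1): A returns [], B returns [[]]
import Mathlib
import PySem

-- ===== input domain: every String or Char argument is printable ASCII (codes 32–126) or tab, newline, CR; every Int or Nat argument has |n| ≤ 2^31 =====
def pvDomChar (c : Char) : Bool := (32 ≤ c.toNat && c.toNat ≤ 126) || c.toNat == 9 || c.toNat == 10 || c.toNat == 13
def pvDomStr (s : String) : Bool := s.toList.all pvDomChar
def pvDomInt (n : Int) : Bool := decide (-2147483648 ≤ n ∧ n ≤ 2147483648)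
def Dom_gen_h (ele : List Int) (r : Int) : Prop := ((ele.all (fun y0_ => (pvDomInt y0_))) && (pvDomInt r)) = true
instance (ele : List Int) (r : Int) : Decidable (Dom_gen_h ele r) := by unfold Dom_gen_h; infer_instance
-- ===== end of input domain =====

-- B replaces A's recursive backtracking DFS by an iterative frontier (r rounds of extending all partial sequences); same output order, no speed claim.


-- ===== PORT A =====
-- A's inner dfs: recursion guarded by fuel (A recurses without bound when r < 0 and ele ≠ [];
-- fuel r.toNat + 1 is enough on every input where the Python returns).
def gen_h_dfs (ele : List Int) (r : Int) : Nat → List Int → List (List Int) → List (List Int)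
  | 0, _, re => re
  | f + 1, path, re =>
    if (path.length : Int) = r then re ++ [path]
    else (List.range ele.length).foldl
      (fun re i => gen_h_dfs ele r f (path ++ [ele.getD i 0]) re) re

def gen_h (ele : List Int) (r : Int) : List (List Int) :=
  gen_h_dfs ele r (r.toNat + 1) [] []

-- ===== PORT B =====
def gen_h_alt (ele : List Int) (r : Int) : List (List Int) :=
  (PySem.List.pyRange 0 r 1).foldl
    (fun result _ => result.flatMap (fun p => ele.map (fun x => p ++ [x]))) [[]]

-- ===== PRECONDITION & SPEC =====
-- Pre_ excludes negative r: there A recurses without bound (RecursionError) whenever ele ≠ [],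
-- and for ele = [] returns [] only as an accident of its loop over an empty range, while B's
-- iterative frontier returns [[]]; a negative length is outside the function's natural domain.
def Pre_gen_h (ele : List Int) (r : Int) : Prop := 0 ≤ r
instance (ele : List Int) (r : Int) : Decidable (Pre_gen_h ele r) := by unfold Pre_gen_h; infer_instance
def pvWitness_gen_h : List Int × Int := ([1, 2], 2)

def Spec_gen_h (ele : List Int) (r : Int) (out : List (List Int)) : Prop := out = gen_h_alt ele r
instance (ele : List Int) (r : Int) (out : List (List Int)) : Decidable (Spec_gen_h ele r out) := by unfold Spec_gen_h; infer_instance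

-- ===== CLAIM =====
def Claim_equal_gen_h : Prop := ∀ (ele : List Int) (r : Int), Dom_gen_h ele r → Pre_gen_h ele r → Spec_gen_h ele r (gen_h ele r)

-- ===== LEMMAS AND PROOFS =====

-- the cartesian product in A's order: first position varies slowest
def prodL (ele : List Int) : Nat → List (List Int)
  | 0 => [[]]
  | n + 1 => ele.flatMap (fun x => (prodL ele n).map (fun t => x :: t))

-- B's one frontier step
def stepB (ele : List Int) (res : List (List Int)) : List (List Int) :=
  res.flatMap (fun p => ele.map (fun x => p ++ [x]))

theorem flatMap_index (ele : List Int) (g : Int → List (List Int)) :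
    (List.range ele.length).flatMap (fun i => g (ele.getD i 0)) = ele.flatMap g := by
  induction ele with
  | nil => simp
  | cons a t ih =>
    simp only [List.length_cons, List.range_succ_eq_map, List.flatMap_cons, List.flatMap_map,
      List.getD_cons_zero, List.getD_cons_succ]
    rw [← ih]

theorem dfs_spec (ele : List Int) (r : Int) :
    ∀ (n f : Nat) (path : List Int) (re : List (List Int)), n < f →
      (path.length : Int) + n = r →
      gen_h_dfs ele r f path re = re ++ (prodL ele n).map (fun t => path ++ t) := by
  intro n
  induction n with
  | zero =>
    intro f path re hf hlen
    obtain ⟨f', rfl⟩ : ∃ f', f = f' + 1 := ⟨f - 1, by omega⟩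
    simp only [gen_h_dfs]
    rw [if_pos (by omega)]
    simp [prodL]
  | succ m ih =>
    intro f path re hf hlen
    obtain ⟨f', rfl⟩ : ∃ f', f = f' + 1 := ⟨f - 1, by omega⟩
    simp only [gen_h_dfs]
    rw [if_neg (by omega)]
    have hstep : ∀ (i : Nat) (acc : List (List Int)),
        gen_h_dfs ele r f' (path ++ [ele.getD i 0]) acc
          = acc ++ (prodL ele m).map (fun t => (path ++ [ele.getD i 0]) ++ t) := by
      intro i acc
      exact ih f' (path ++ [ele.getD i 0]) acc (by omega) (by simp; omega)
    calc (List.range ele.length).foldl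
          (fun re i => gen_h_dfs ele r f' (path ++ [ele.getD i 0]) re) re
        = (List.range ele.length).foldl
            (fun acc i => acc ++ (prodL ele m).map (fun t => (path ++ [ele.getD i 0]) ++ t)) re := by
          exact PySem.List.foldl_congr_mem _ _ _ _ (fun acc i _ => hstep i acc)
      _ = re ++ (List.range ele.length).flatMap
            (fun i => (prodL ele m).map (fun t => (path ++ [ele.getD i 0]) ++ t)) := by
          exact PySem.List.foldl_append_eq_flatMap _ _ _
      _ = re ++ (prodL ele (m + 1)).map (fun t => path ++ t) := by
          rw [flatMap_index ele (fun x => (prodL ele m).map (fun t => (path ++ [x]) ++ t))]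
          simp only [prodL, List.map_flatMap, List.map_map, Function.comp_def]
          simp

theorem stepB_flatMap_cons (ele : List Int) (L : List (List Int)) :
    stepB ele (ele.flatMap (fun x => L.map (fun t => x :: t)))
      = ele.flatMap (fun x => (stepB ele L).map (fun t => x :: t)) := by
  simp [stepB, List.map_flatMap, List.flatMap_assoc, List.flatMap_map, List.map_map, Function.comp_def]

theorem stepB_prodL (ele : List Int) : ∀ n, stepB ele (prodL ele n) = prodL ele (n + 1) := by
  intro n
  induction n with
  | zero =>
    simp only [prodL, stepB, List.flatMap_cons, List.flatMap_nil, List.map_nil, List.append_nil,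
      List.map_cons, List.nil_append]
    induction ele with
    | nil => rfl
    | cons a t iht => simp [iht]
  | succ m ih =>
    show stepB ele (prodL ele (m + 1)) = prodL ele (m + 2)
    rw [show prodL ele (m + 1) = ele.flatMap (fun x => (prodL ele m).map (fun t => x :: t)) from rfl,
      stepB_flatMap_cons, ih]
    rfl

theorem foldl_const_prodL (ele : List Int) :
    ∀ (l : List Int) (n : Nat), l.foldl (fun res (_ : Int) => stepB ele res) (prodL ele n)
      = prodL ele (n + l.length) := by
  intro l
  induction l with
  | nil => simp
  | cons a t ih =>
    intro n
    simp only [List.foldl_cons, stepB_prodL, List.length_cons]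
    rw [ih (n + 1)]
    congr 1
    omega

-- ===== VERDICT =====
theorem gen_h_spec : Claim_equal_gen_h := by
  intro ele r _ hpre
  unfold Pre_gen_h at hpre
  unfold Spec_gen_h gen_h gen_h_alt
  rw [dfs_spec ele r r.toNat (r.toNat + 1) [] [] (by omega) (by simp; omega)]
  have h := foldl_const_prodL ele (PySem.List.pyRange 0 r 1) 0
  simp only [Nat.zero_add, PySem.List.length_pyRange_one] at h
  rw [show (fun result x => List.flatMap (fun p => List.map (fun x => p ++ [x]) ele) result)
      = (fun res (_ : Int) => stepB ele res) from rfl]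
  rw [show ([[]] : List (List Int)) = prodL ele 0 from rfl, h]
  simp
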